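-- pv_equiv track=rewrite | github.com/SolideSnake/ChirpScan | src/filters/expression.py | match_expression
-- ===== SOURCE A (Python) =====
-- from typing import Iterable, List, Sequence
--
-- def normalize_filter_expression(raw: object) -> str:
--     if raw is None:
--         return ""
--
--     if isinstance(raw, list):
--         raw_text = ",".join(str(item) for item in raw)
--     else:
--         raw_text = str(raw)
--
--     clauses: List[str] = []
--     for clause in raw_text.replace("\r", "\n").replace("\n", ",").split(","):
--         parts = [part.strip() for part in clause.split("+") if part.strip()]
--         if not parts:
--             continue
--         clauses.append("+".join(parts))
--     return ",".join(clauses)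
--
-- def _split_clauses(expression: str) -> List[List[str]]:
--     normalized = normalize_filter_expression(expression)
--     if not normalized:
--         return []
--
--     clauses: List[List[str]] = []
--     for clause in normalized.split(","):
--         parts = [part.strip().lower() for part in clause.split("+") if part.strip()]
--         if parts:
--             clauses.append(parts)
--     return clauses
--
-- def match_expression(text: str, expression: str) -> str:
--     if not expression:
--         return ""
--
--     normalized_text = (text or "").lower()
--     for clause_parts in _split_clauses(expression):
--         if all(part in normalized_text for part in clause_parts):
--             return "+".join(clause_parts)
--     return ""
-- ===== SOURCE B (Python) =====
-- def match_expression(text: str, expression: str) -> str: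
--     """One streaming pass over the expression: a small character automaton builds
--     each clause's parts in place and answers at the first clause boundary whose
--     parts all occur in the lowered text (no split/normalize pipeline)."""
--     t = text.lower()
--     parts, buf = [], []
--     for ch in expression + ",":
--         if ch in "+,\r\n":
--             p = "".join(buf).strip().lower()
--             del buf[:]
--             if p:
--                 parts.append(p)
--             if ch != "+":
--                 if parts and all(q in t for q in parts):
--                     return "+".join(parts)
--                 parts = []
--         else:
--             buf.append(ch)
--     return ""
-- ===== Notes on version B (the rewrite author's own statement) =====
-- stated objective: alternative
-- what changed: B replaces A's three-function normalize->serialize->re-split pipeline with a single-pass character automaton: one loop over the expression's characters maintains a part buffer and the current clause's parts, flushes at '+'/','/newline boundaries, and answers at the first clause boundary whose parts all occur in the lowered text.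
import Mathlib
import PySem

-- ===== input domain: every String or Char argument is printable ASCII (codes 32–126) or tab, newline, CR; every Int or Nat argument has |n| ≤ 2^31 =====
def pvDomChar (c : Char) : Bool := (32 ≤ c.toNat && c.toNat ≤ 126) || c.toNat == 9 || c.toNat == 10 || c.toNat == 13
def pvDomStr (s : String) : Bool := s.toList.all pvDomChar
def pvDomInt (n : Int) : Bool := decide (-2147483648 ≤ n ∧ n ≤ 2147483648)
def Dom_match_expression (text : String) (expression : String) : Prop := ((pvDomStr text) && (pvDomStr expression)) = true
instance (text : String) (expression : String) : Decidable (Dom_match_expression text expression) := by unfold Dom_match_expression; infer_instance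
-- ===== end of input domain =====

-- B replaces A's normalize→serialize→re-split pipeline by a single-pass character automaton over the expression (objective: alternative decomposition, same cost).

-- ===== PORT A =====
-- `raw` is always a str at this call site, so the Python's `raw is None` and `isinstance(raw, list)`
-- branches are unreachable and only the `str(raw)` path is ported.
def normalize_filter_expression (raw : List Char) : List Char :=
  let rawText := raw
  let clauses : List (List Char) :=
    (PySem.Chars.splitOn (PySem.Chars.replace (PySem.Chars.replace rawText ['\r'] ['\n']) ['\n'] [',']) [',']).foldl
      (fun acc clause =>
        let parts := ((PySem.Chars.splitOn clause ['+']).filter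
            (fun part => !(PySem.Chars.strip part).isEmpty)).map (fun part => PySem.Chars.strip part)
        if parts.isEmpty then acc else acc ++ [PySem.Chars.join ['+'] parts]) []
  PySem.Chars.join [','] clauses

def split_clauses_A (expression : List Char) : List (List (List Char)) :=
  let normalized := normalize_filter_expression expression
  if normalized.isEmpty then []
  else
    (PySem.Chars.splitOn normalized [',']).foldl
      (fun acc clause =>
        let parts := ((PySem.Chars.splitOn clause ['+']).filter
            (fun part => !(PySem.Chars.strip part).isEmpty)).map
            (fun part => PySem.Chars.lower (PySem.Chars.strip part))
        if parts.isEmpty then acc else acc ++ [parts]) []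

-- the `for clause_parts in …: if all(…): return …` loop of A, with its early return
def matchLoopA (ntext : List Char) : List (List (List Char)) → List Char
  | [] => []
  | clause :: rest =>
      if clause.all (fun part => PySem.Chars.isIn part ntext) then PySem.Chars.join ['+'] clause
      else matchLoopA ntext rest

def match_expression (text : String) (expression : String) : String :=
  if expression.toList.isEmpty then ""
  else
    let normalizedText := PySem.Chars.lower text.toList  -- (text or "").lower(); `text or ""` = text for a str
    String.ofList (matchLoopA normalizedText (split_clauses_A expression.toList))

-- ===== PORT B =====
-- the inner `p = "".join(buf).strip().lower(); if p: parts.append(p)` step of B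
def flushPart (buf : List Char) (parts : List (List Char)) : List (List Char) :=
  let p := PySem.Chars.lower (PySem.Chars.strip buf)
  if p.isEmpty then parts else parts ++ [p]

-- the `for ch in expression + ","` automaton of B, with its early return
def scanB (t : List Char) : List Char → List Char → List (List Char) → List Char
  | [], _buf, _parts => []
  | c :: rest, buf, parts =>
    if c = '+' then scanB t rest [] (flushPart buf parts)
    else if c = ',' ∨ c = '\r' ∨ c = '\n' then
      if !(flushPart buf parts).isEmpty && (flushPart buf parts).all (fun p => PySem.Chars.isIn p t) then
        PySem.Chars.join ['+'] (flushPart buf parts)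
      else scanB t rest [] []
    else scanB t rest (buf ++ [c]) parts

def match_expression_alt (text : String) (expression : String) : String :=
  let t := PySem.Chars.lower text.toList
  String.ofList (scanB t (expression.toList ++ [',']) [] [])

-- ===== PRECONDITION & SPEC =====
def Spec_match_expression (text : String) (expression : String) (out : String) : Prop := out = match_expression_alt text expression
instance (text : String) (expression : String) (out : String) : Decidable (Spec_match_expression text expression out) := by unfold Spec_match_expression; infer_instance

-- ===== CLAIM (what is proved, stated in full; the proofs are below) =====
def Claim_equal_match_expression : Prop := ∀ (text : String) (expression : String), Dom_match_expression text expression → Spec_match_expression text expression (match_expression text expression)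

-- ===== LEMMAS AND PROOFS =====

-- PySem.Chars.splitOn with a one-character separator is Mathlib's List.splitOn
theorem chars_splitOn_go_single (c : Char) : ∀ (fuel : Nat) (l cur : List Char) (accs : List (List Char)),
    l.length < fuel →
    PySem.Chars.splitOn.go [c] fuel l cur accs = accs.reverse ++ (List.splitOn c l).modifyHead (cur.reverse ++ ·) := by
  intro fuel
  induction fuel with
  | zero => intro l cur accs h; omega
  | succ n ih =>
    intro l cur accs h
    cases l with
    | nil => simp [PySem.Chars.splitOn.go, List.splitOn]
    | cons a rest =>
      rw [PySem.Chars.splitOn.go]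
      by_cases hca : c = a
      · subst hca
        simp only [List.isPrefixOf, beq_self_eq_true, Bool.true_and, if_true]
        rw [ih _ _ _ (by simpa using Nat.lt_of_succ_lt_succ h)]
        have hne := List.splitOnP_ne_nil (fun x => x == c) rest
        obtain ⟨hd, tl, hh⟩ := List.exists_cons_of_ne_nil hne
        simp [List.splitOn, List.splitOnP_cons, hh, List.modifyHead]
      · have hpf : [c].isPrefixOf (a :: rest) = false := by
          simp [List.isPrefixOf, hca]
        rw [hpf]
        simp only [Bool.false_eq_true, if_false]
        rw [ih _ _ _ (by simpa using Nat.lt_of_succ_lt_succ h)]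
        have hne := List.splitOnP_ne_nil (fun x => x == c) rest
        obtain ⟨hd, tl, hh⟩ := List.exists_cons_of_ne_nil hne
        have hsp : List.splitOn c (a :: rest) = List.modifyHead (fun x => a :: x) (hd :: tl) := by
          simp [List.splitOn, List.splitOnP_cons, beq_iff_eq, Ne.symm hca, hh]
        rw [hsp]
        simp [List.splitOn, hh, List.modifyHead]

theorem chars_splitOn_single (s : List Char) (c : Char) :
    PySem.Chars.splitOn s [c] = List.splitOn c s := by
  rw [PySem.Chars.splitOn, chars_splitOn_go_single c _ _ _ _ (by omega)]
  have hne := List.splitOnP_ne_nil (fun x => x == c) s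
  obtain ⟨hd, tl, hh⟩ := List.exists_cons_of_ne_nil hne
  simp [List.splitOn, hh, List.modifyHead]

theorem splitOn_cons_sep (a : Char) (l : List Char) :
    List.splitOn a (a :: l) = [] :: List.splitOn a l := by
  simp [List.splitOn, List.splitOnP_cons]

theorem splitOn_cons_ne {a c : Char} (l : List Char) (h : c ≠ a) :
    List.splitOn a (c :: l) = (List.splitOn a l).modifyHead (c :: ·) := by
  simp [List.splitOn, List.splitOnP_cons, h]

theorem mem_splitOn_props {c : Char} : ∀ {l b : List Char}, b ∈ List.splitOn c l → c ∉ b ∧ b.Sublist l := by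
  intro l
  induction l with
  | nil => intro b hb; simp [List.splitOn] at hb; simp [hb]
  | cons a rest ih =>
    intro b hb
    by_cases hca : a = c
    · subst hca
      simp only [List.splitOn, List.splitOnP_cons, beq_self_eq_true, if_true] at hb
      rcases List.mem_cons.mp hb with h | h
      · simp [h]
      · obtain ⟨h1, h2⟩ := ih h
        exact ⟨h1, h2.trans (List.sublist_cons_self _ _)⟩
    · simp only [List.splitOn, List.splitOnP_cons, beq_iff_eq, hca, if_false] at hb
      have hne := List.splitOnP_ne_nil (fun x => x == c) rest
      obtain ⟨hd, tl, hh⟩ := List.exists_cons_of_ne_nil hne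
      have hh' : List.splitOn c rest = hd :: tl := hh
      rw [hh, List.modifyHead] at hb
      rcases List.mem_cons.mp hb with h | h
      · subst h
        obtain ⟨h1, h2⟩ := ih (by rw [hh']; exact List.mem_cons_self ..)
        refine ⟨by simp [h1]; exact fun he => hca he.symm, List.cons_sublist_cons.mpr h2⟩
      · obtain ⟨h1, h2⟩ := ih (by rw [hh']; exact List.mem_cons_of_mem _ h)
        exact ⟨h1, h2.trans (List.sublist_cons_self _ _)⟩

theorem chars_rstrip_idem (s : List Char) : PySem.Chars.rstrip (PySem.Chars.rstrip s) = PySem.Chars.rstrip s := by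
  simp [PySem.Chars.rstrip, List.dropWhile_idempotent]

theorem chars_lstrip_of_lstrip (s : List Char) (h : ∀ x ∈ s.head?, ¬ PySem.Chars.isspace x = true) :
    PySem.Chars.lstrip s = s := by
  cases s with
  | nil => rfl
  | cons a t => simp [PySem.Chars.lstrip, h a (by simp)]

theorem head?_dropWhile_false (p : Char → Bool) (l : List Char) (x : Char)
    (h : (l.dropWhile p).head? = some x) : p x = false := by
  have hne : l.dropWhile p ≠ [] := by intro h0; rw [h0] at h; simp at h
  have hx : (l.dropWhile p).head hne = x := by
    have h2 := List.head?_eq_some_head hne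
    rw [h] at h2
    exact (Option.some.inj h2).symm
  have h3 := List.head_dropWhile_not p hne
  rw [hx] at h3
  simpa using h3

theorem chars_rstrip_prefix (y : List Char) : (PySem.Chars.rstrip y) <+: y := by
  rw [PySem.Chars.rstrip]
  obtain ⟨t, ht⟩ := List.dropWhile_suffix (l := y.reverse) PySem.Chars.isspace
  exact ⟨t.reverse, by rw [← List.reverse_append, ht, List.reverse_reverse]⟩

theorem chars_strip_idem (s : List Char) : PySem.Chars.strip (PySem.Chars.strip s) = PySem.Chars.strip s := by
  rw [PySem.Chars.strip, PySem.Chars.strip]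
  have hls : PySem.Chars.lstrip (PySem.Chars.rstrip (PySem.Chars.lstrip s)) = PySem.Chars.rstrip (PySem.Chars.lstrip s) := by
    apply chars_lstrip_of_lstrip
    intro x hx
    obtain ⟨t, ht⟩ := chars_rstrip_prefix (PySem.Chars.lstrip s)
    have hhead : (PySem.Chars.lstrip s).head? = some x := by
      cases hr : PySem.Chars.rstrip (PySem.Chars.lstrip s) with
      | nil => rw [hr] at hx; simp at hx
      | cons a u =>
        rw [hr] at hx ht
        simp at hx
        rw [← ht, hx]
        simp
    have := head?_dropWhile_false PySem.Chars.isspace s x (by rwa [PySem.Chars.lstrip] at hhead)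
    simp [this]
  rw [hls, chars_rstrip_idem]

theorem chars_strip_sublist (s : List Char) : (PySem.Chars.strip s).Sublist s := by
  have h1 : (PySem.Chars.rstrip (PySem.Chars.lstrip s)).Sublist (PySem.Chars.lstrip s) := by
    rw [PySem.Chars.rstrip]
    have := (List.dropWhile_sublist (l := (PySem.Chars.lstrip s).reverse) PySem.Chars.isspace).reverse
    simpa using this
  exact h1.trans (List.dropWhile_sublist _)

-- A's first-pass parts of a clause string
def pAf (c : List Char) : List (List Char) :=
  ((List.splitOn '+' c).filter (fun part => !(PySem.Chars.strip part).isEmpty)).map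
    (fun part => PySem.Chars.strip part)

theorem intercalate_cons2 (x a : List Char) (l : List (List Char)) (h : l ≠ []) :
    x.intercalate (a :: l) = a ++ x ++ x.intercalate l := by
  obtain ⟨b, t, rfl⟩ := List.exists_cons_of_ne_nil h
  simp [List.intercalate, List.intersperse]

theorem intercalate_single (x a : List Char) : x.intercalate [a] = a := by
  simp [List.intercalate, List.intersperse]

theorem not_mem_intercalate {a x : Char} : ∀ {ls : List (List Char)}, a ≠ x → (∀ l ∈ ls, a ∉ l) → a ∉ [x].intercalate ls := by
  intro ls
  induction ls with
  | nil => intro _ _; simp [List.intercalate]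
  | cons b t ih =>
    intro hx h
    cases t with
    | nil => simpa [intercalate_single] using h b (by simp)
    | cons c u =>
      rw [intercalate_cons2 _ _ _ (by simp)]
      intro hc
      rcases List.mem_append.mp hc with hc | hc
      · rcases List.mem_append.mp hc with hc | hc
        · exact h b (by simp) hc
        · simp at hc; exact hx hc
      · exact ih hx (fun l hl => h l (List.mem_cons_of_mem _ hl)) hc

theorem pA_mem {c p : List Char} (hp : p ∈ pAf c) :
    p ≠ [] ∧ PySem.Chars.strip p = p ∧ '+' ∉ p ∧ p.Sublist c := by
  obtain ⟨q, hq, rfl⟩ := List.mem_map.mp hp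
  obtain ⟨hq1, hq2⟩ := List.mem_filter.mp hq
  obtain ⟨hplus, hsub⟩ := mem_splitOn_props hq1
  refine ⟨?_, chars_strip_idem q, ?_, (chars_strip_sublist q).trans hsub⟩
  · simpa using hq2
  · exact fun hm => hplus ((chars_strip_sublist q).subset hm)

theorem resplit {c : List Char} (h : pAf c ≠ []) :
    List.splitOn '+' (['+'].intercalate (pAf c)) = pAf c :=
  List.splitOn_intercalate _ '+' (fun _ hl => (pA_mem hl).2.2.1) h

-- A's second-pass parts of a clause string
def p2f (c : List Char) : List (List Char) :=
  ((List.splitOn '+' c).filter (fun part => !(PySem.Chars.strip part).isEmpty)).map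
    (fun part => PySem.Chars.lower (PySem.Chars.strip part))

theorem parts2_rejoined {c : List Char} (h : pAf c ≠ []) :
    p2f (['+'].intercalate (pAf c)) = (pAf c).map PySem.Chars.lower := by
  rw [p2f, resplit h]
  rw [List.filter_eq_self.mpr (by intro p hp; rw [(pA_mem hp).2.1]; simp [(pA_mem hp).1])]
  exact List.map_congr_left (fun p hp => by rw [(pA_mem hp).2.1])

theorem p2f_eq_pAf_lower (c : List Char) : p2f c = (pAf c).map PySem.Chars.lower := by
  simp [p2f, pAf, List.map_map, Function.comp]

theorem foldl_skip {α β : Type} (p : α → Bool) (f : α → β) (l : List α) :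
    l.foldl (fun acc x => if p x then acc else acc ++ [f x]) [] = (l.filter (fun x => !p x)).map f := by
  have h : (fun (acc : List β) x => if p x then acc else acc ++ [f x])
      = (fun acc x => if !p x then acc ++ [f x] else acc) := by
    funext acc x
    cases p x <;> simp
  rw [h, PySem.List.foldl_append_if]
  simp

theorem intercalate_plus_ne_nil {c : List Char} (h : pAf c ≠ []) : ['+'].intercalate (pAf c) ≠ [] := by
  obtain ⟨p0, ps, hp⟩ := List.exists_cons_of_ne_nil h
  have hp0 : p0 ≠ [] := (pA_mem (by rw [hp]; exact List.mem_cons_self ..)).1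
  cases ps with
  | nil => rw [hp, intercalate_single]; exact hp0
  | cons q qs => rw [hp, intercalate_cons2 _ _ _ (by simp)]; simp [hp0]

theorem matchLoopA_eq_find? (t : List Char) (L : List (List (List Char))) :
    matchLoopA t L =
      (match L.find? (fun clause => clause.all (fun part => PySem.Chars.isIn part t)) with
        | some clause => PySem.Chars.join ['+'] clause
        | none => []) := by
  induction L with
  | nil => rfl
  | cons clause rest ih =>
    by_cases h : clause.all (fun part => PySem.Chars.isIn part t)
    · simp [matchLoopA, List.find?, h]
    · simp only [Bool.not_eq_true] at h
      simp [matchLoopA, List.find?, h, ih]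

theorem normalizeA_eq (el : List Char) :
    normalize_filter_expression el =
      [','].intercalate
        (((List.splitOn ',' (PySem.Chars.replace (PySem.Chars.replace el ['\r'] ['\n']) ['\n'] [','])).filter
            (fun c => !(pAf c).isEmpty)).map (fun c => ['+'].intercalate (pAf c))) := by
  rw [normalize_filter_expression]
  simp only [chars_splitOn_single]
  rw [show (fun (acc : List (List Char)) clause =>
        let parts := ((List.splitOn '+' clause).filter
            (fun part => !(PySem.Chars.strip part).isEmpty)).map (fun part => PySem.Chars.strip part)
        if parts.isEmpty then acc else acc ++ [PySem.Chars.join ['+'] parts])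
      = (fun acc clause => if (pAf clause).isEmpty then acc else acc ++ [['+'].intercalate (pAf clause)]) from by
        funext acc clause; simp [pAf, PySem.Chars.join]]
  rw [foldl_skip]
  rfl

theorem split_clausesA_eq (el : List Char) (hK : ((List.splitOn ',' (PySem.Chars.replace (PySem.Chars.replace el ['\r'] ['\n']) ['\n'] [','])).filter (fun c => !(pAf c).isEmpty)) ≠ []) :
    split_clauses_A el =
      ((List.splitOn ',' (PySem.Chars.replace (PySem.Chars.replace el ['\r'] ['\n']) ['\n'] [','])).filter
          (fun c => !(pAf c).isEmpty)).map (fun c => (pAf c).map PySem.Chars.lower) := by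
  set K := (List.splitOn ',' (PySem.Chars.replace (PySem.Chars.replace el ['\r'] ['\n']) ['\n'] [','])).filter (fun c => !(pAf c).isEmpty) with hKdef
  set S := K.map (fun c => ['+'].intercalate (pAf c)) with hS
  have hKne : ∀ c ∈ K, pAf c ≠ [] := by
    intro c hc
    have h2 := (List.mem_filter.mp hc).2
    simpa using h2
  have hSne : S ≠ [] := by
    rw [hS]
    simpa using hK
  have hSmemne : ∀ s ∈ S, s ≠ [] := by
    intro s hs
    obtain ⟨c, hc, rfl⟩ := List.mem_map.mp hs
    exact intercalate_plus_ne_nil (hKne c hc)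
  have hScomma : ∀ s ∈ S, ',' ∉ s := by
    intro s hs
    obtain ⟨c, hc, rfl⟩ := List.mem_map.mp hs
    have hcP := (List.mem_filter.mp hc).1
    have hcomma : ',' ∉ c := (mem_splitOn_props hcP).1
    apply not_mem_intercalate (by decide)
    intro p hp2 hmem
    exact hcomma ((pA_mem hp2).2.2.2.subset hmem)
  have hnorm : normalize_filter_expression el = [','].intercalate S := by
    rw [normalizeA_eq el]
  have hnne : ¬ (([','].intercalate S).isEmpty = true) := by
    rw [List.isEmpty_iff]
    obtain ⟨s0, S', hS0⟩ := List.exists_cons_of_ne_nil hSne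
    have h0 := hSmemne s0 (by rw [hS0]; exact List.mem_cons_self ..)
    rw [hS0]
    cases S' with
    | nil => rwa [intercalate_single]
    | cons b u => rw [intercalate_cons2 _ _ _ (by simp)]; simp [h0]
  rw [split_clauses_A, hnorm, if_neg hnne, chars_splitOn_single,
      List.splitOn_intercalate S ',' hScomma hSne]
  rw [show (fun (acc : List (List (List Char))) clause =>
        let parts := ((PySem.Chars.splitOn clause ['+']).filter
            (fun part => !(PySem.Chars.strip part).isEmpty)).map
            (fun part => PySem.Chars.lower (PySem.Chars.strip part))
        if parts.isEmpty then acc else acc ++ [parts])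
      = (fun acc clause => if (p2f clause).isEmpty then acc else acc ++ [p2f clause]) from by
        funext acc clause; simp [p2f, chars_splitOn_single]]
  rw [foldl_skip]
  have hfilt : S.filter (fun s => !(p2f s).isEmpty) = S := by
    apply List.filter_eq_self.mpr
    intro s hs
    obtain ⟨c, hc, rfl⟩ := List.mem_map.mp hs
    rw [parts2_rejoined (hKne c hc)]
    simpa using hKne c hc
  rw [hfilt, hS, List.map_map]
  apply List.map_congr_left
  intro c hc
  simp only [Function.comp]
  exact parts2_rejoined (hKne c hc)

theorem split_clausesA_nil (el : List Char)
    (hK : ((List.splitOn ',' (PySem.Chars.replace (PySem.Chars.replace el ['\r'] ['\n']) ['\n'] [','])).filter (fun c => !(pAf c).isEmpty)) = []) :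
    split_clauses_A el = [] := by
  rw [split_clauses_A, normalizeA_eq el, hK]
  simp [List.intercalate]

-- ===== B-side lemmas: the automaton computes the same clause list =====

-- single-character replace is a map
theorem chars_replace_go_single (a b : Char) : ∀ (fuel : Nat) (l acc : List Char),
    l.length ≤ fuel →
    PySem.Chars.replace.go [a] [b] fuel l acc = acc.reverse ++ l.map (fun c => if c = a then b else c) := by
  intro fuel
  induction fuel with
  | zero =>
    intro l acc h
    have : l = [] := List.eq_nil_of_length_eq_zero (Nat.le_zero.mp h)
    subst this
    simp [PySem.Chars.replace.go]
  | succ n ih =>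
    intro l acc h
    cases l with
    | nil => simp [PySem.Chars.replace.go]
    | cons c t =>
      rw [PySem.Chars.replace.go]
      by_cases hca : a = c
      · subst hca
        simp only [List.isPrefixOf, beq_self_eq_true, Bool.true_and, if_true]
        rw [show List.drop (List.length [a]) (a :: t) = t from rfl]
        rw [ih _ _ (by simpa using Nat.le_of_succ_le_succ h)]
        simp
      · have hpf : [a].isPrefixOf (c :: t) = false := by simp [List.isPrefixOf, hca]
        rw [hpf]
        simp only [Bool.false_eq_true, if_false]
        rw [ih _ _ (by simpa using Nat.le_of_succ_le_succ h)]
        simp [Ne.symm hca]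

theorem chars_replace_single (l : List Char) (a b : Char) :
    PySem.Chars.replace l [a] [b] = l.map (fun c => if c = a then b else c) := by
  rw [PySem.Chars.replace]
  simp only [List.isEmpty_cons, Bool.false_eq_true, if_false]
  exact chars_replace_go_single a b l.length l [] (Nat.le_refl _)

-- the net effect of A's two replaces: every '\r', '\n' (and ',') becomes ','
def sigmaRep (c : Char) : Char := if c = ',' ∨ c = '\r' ∨ c = '\n' then ',' else c

theorem replaces_eq_map_sigma (el : List Char) :
    PySem.Chars.replace (PySem.Chars.replace el ['\r'] ['\n']) ['\n'] [','] = el.map sigmaRep := by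
  rw [chars_replace_single, chars_replace_single, List.map_map]
  apply List.map_congr_left
  intro c _
  simp only [Function.comp, sigmaRep]
  by_cases h1 : c = ','
  · simp [h1]
  · by_cases h2 : c = '\r'
    · simp [h2]
    · by_cases h3 : c = '\n' <;> simp [h1, h2, h3]

-- pure clause extraction performed by the automaton (no early return)
def clausesRaw : List Char → List Char → List (List Char) → List (List (List Char))
  | [], _buf, _parts => []
  | c :: rest, buf, parts =>
    if c = '+' then clausesRaw rest [] (flushPart buf parts)
    else if c = ',' ∨ c = '\r' ∨ c = '\n' then
      (if (flushPart buf parts).isEmpty then [] else [flushPart buf parts]) ++ clausesRaw rest [] []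
    else clausesRaw rest (buf ++ [c]) parts

-- parts of one clause chunk, starting from pending buffer/parts state
def cpB : List Char → List Char → List (List Char) → List (List Char)
  | [], buf, parts => flushPart buf parts
  | c :: r, buf, parts =>
    if c = '+' then cpB r [] (flushPart buf parts)
    else cpB r (buf ++ [c]) parts

-- clause list from split chunks, first chunk continuing the pending state
def dListB : List (List Char) → List Char → List (List Char) → List (List (List Char))
  | [], _buf, _parts => []
  | c :: rest, buf, parts =>
    (if (cpB c buf parts).isEmpty then [] else [cpB c buf parts]) ++ dListB rest [] []

theorem scanB_eq_find? (t : List Char) : ∀ (l buf : List Char) (parts : List (List Char)),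
    scanB t l buf parts =
      (match (clausesRaw l buf parts).find? (fun clause => clause.all (fun p => PySem.Chars.isIn p t)) with
        | some clause => PySem.Chars.join ['+'] clause
        | none => []) := by
  intro l
  induction l with
  | nil => intro buf parts; rfl
  | cons c rest ih =>
    intro buf parts
    by_cases hp : c = '+'
    · rw [scanB, clausesRaw, if_pos hp, if_pos hp, ih]
    · by_cases hs : c = ',' ∨ c = '\r' ∨ c = '\n'
      · rw [scanB, clausesRaw, if_neg hp, if_neg hp, if_pos hs, if_pos hs]
        by_cases he : (flushPart buf parts).isEmpty
        · have hcond : (!(flushPart buf parts).isEmpty && (flushPart buf parts).all (fun p => PySem.Chars.isIn p t)) = false := by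
            simp [he]
          rw [hcond, if_pos he]
          simp only [Bool.false_eq_true, if_false, List.nil_append]
          exact ih [] []
        · simp only [if_neg he]
          by_cases hall : (flushPart buf parts).all (fun p => PySem.Chars.isIn p t)
          · have : (!(flushPart buf parts).isEmpty && (flushPart buf parts).all (fun p => PySem.Chars.isIn p t)) = true := by
              simp [he, hall]
            rw [if_pos this]
            simp [hall]
          · have : (!(flushPart buf parts).isEmpty && (flushPart buf parts).all (fun p => PySem.Chars.isIn p t)) = false := by
              simp [hall]
            simp only [this, Bool.false_eq_true, if_false]
            rw [ih]
            have hfind : ((flushPart buf parts :: clausesRaw rest [] []).find?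
                (fun clause => clause.all (fun p => PySem.Chars.isIn p t)))
                = (clausesRaw rest [] []).find? (fun clause => clause.all (fun p => PySem.Chars.isIn p t)) := by
              rw [List.find?]
              simp [hall]
            rw [List.singleton_append, hfind]
      · rw [scanB, clausesRaw, if_neg hp, if_neg hp, if_neg hs, if_neg hs, ih]

theorem clausesRaw_eq_dListB : ∀ (l buf : List Char) (parts : List (List Char)),
    clausesRaw (l ++ [',']) buf parts = dListB (List.splitOn ',' (l.map sigmaRep)) buf parts := by
  intro l
  induction l with
  | nil =>
    intro buf parts
    show clausesRaw [','] buf parts = dListB [[]] buf parts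
    rw [clausesRaw, if_neg (by decide), if_pos (by simp), dListB]
    simp [clausesRaw, dListB, cpB]
  | cons c rest ih =>
    intro buf parts
    by_cases hp : c = '+'
    · subst hp
      rw [List.cons_append, clausesRaw, if_pos rfl]
      rw [List.map_cons, show sigmaRep '+' = '+' from rfl,
          splitOn_cons_ne _ (by decide)]
      obtain ⟨c0, cs, hsp⟩ := List.exists_cons_of_ne_nil (show List.splitOn ',' (rest.map sigmaRep) ≠ [] from List.splitOnP_ne_nil _ _)
      rw [hsp, List.modifyHead, dListB]
      rw [show cpB ('+' :: c0) buf parts = cpB c0 [] (flushPart buf parts) from by rw [cpB, if_pos rfl]]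
      rw [ih, hsp, dListB]
    · by_cases hs : c = ',' ∨ c = '\r' ∨ c = '\n'
      · rw [List.cons_append, clausesRaw, if_neg hp, if_pos hs]
        have hσ : sigmaRep c = ',' := by rw [sigmaRep, if_pos hs]
        rw [List.map_cons, hσ, splitOn_cons_sep, dListB]
        rw [show cpB [] buf parts = flushPart buf parts from rfl]
        rw [ih]
      · rw [List.cons_append, clausesRaw, if_neg hp, if_neg hs]
        have hσ : sigmaRep c = c := by rw [sigmaRep, if_neg hs]
        rw [List.map_cons, hσ, splitOn_cons_ne _ (by simpa using fun h => hs (Or.inl h))]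
        obtain ⟨c0, cs, hsp⟩ := List.exists_cons_of_ne_nil (show List.splitOn ',' (rest.map sigmaRep) ≠ [] from List.splitOnP_ne_nil _ _)
        rw [hsp, List.modifyHead, dListB]
        rw [show cpB (c :: c0) buf parts = cpB c0 (buf ++ [c]) parts from by rw [cpB, if_neg hp]]
        rw [ih, hsp, dListB]

theorem splitOn_of_not_mem {a : Char} : ∀ {l : List Char}, a ∉ l → List.splitOn a l = [l] := by
  intro l
  induction l with
  | nil => intro _; rfl
  | cons c t ih =>
    intro h
    rw [splitOn_cons_ne _ (fun hc => h (by rw [hc]; exact List.mem_cons_self ..)),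
        ih (fun hm => h (List.mem_cons_of_mem _ hm)), List.modifyHead]

theorem splitOn_append_sep {a : Char} (r : List Char) : ∀ {buf : List Char}, a ∉ buf →
    List.splitOn a (buf ++ a :: r) = buf :: List.splitOn a r := by
  intro buf
  induction buf with
  | nil => intro _; simpa using splitOn_cons_sep a r
  | cons c t ih =>
    intro h
    rw [List.cons_append, splitOn_cons_ne _ (fun hc => h (by rw [hc]; exact List.mem_cons_self ..)),
        ih (fun hm => h (List.mem_cons_of_mem _ hm)), List.modifyHead]

theorem cpB_eq_p2f : ∀ (c buf : List Char) (parts : List (List Char)), '+' ∉ buf →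
    cpB c buf parts = parts ++ p2f (buf ++ c) := by
  intro c
  induction c with
  | nil =>
    intro buf parts h
    rw [cpB, flushPart, p2f, List.append_nil, splitOn_of_not_mem h]
    by_cases he : (PySem.Chars.strip buf).isEmpty
    · simp [he, PySem.Chars.lower]
    · simp [he, PySem.Chars.lower]
  | cons c r ih =>
    intro buf parts h
    by_cases hp : c = '+'
    · subst hp
      rw [cpB, if_pos rfl, ih [] _ (by simp)]
      simp only [List.nil_append, p2f, splitOn_append_sep r h, List.filter_cons]
      by_cases he : (PySem.Chars.strip buf).isEmpty
      · simp [flushPart, PySem.Chars.lower, he]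
      · simp [flushPart, PySem.Chars.lower, he]
    · rw [cpB, if_neg hp, ih (buf ++ [c]) parts (by
        intro hm
        rcases List.mem_append.mp hm with hm | hm
        · exact h hm
        · simp at hm; exact hp hm.symm)]
      simp

theorem dListB_empty_state (cls : List (List Char)) :
    dListB cls [] [] = (cls.filter (fun c => !(pAf c).isEmpty)).map (fun c => (pAf c).map PySem.Chars.lower) := by
  induction cls with
  | nil => rfl
  | cons c rest ih =>
    rw [dListB, List.filter_cons]
    have hcp : cpB c [] [] = (pAf c).map PySem.Chars.lower := by
      rw [cpB_eq_p2f c [] [] (by simp), List.nil_append, p2f_eq_pAf_lower]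
      rfl
    by_cases he : (pAf c).isEmpty
    · have : (cpB c [] []).isEmpty = true := by rw [hcp]; simp [he]
      simp only [this, if_pos, he, Bool.not_true, Bool.false_eq_true, if_false]
      simpa using ih
    · have : ¬ ((cpB c [] []).isEmpty = true) := by rw [hcp]; simpa using he
      simp only [if_neg this, he]
      simp only [Bool.not_false, if_pos]
      rw [List.map_cons, hcp, ih]
      rfl

theorem alt_eq_find? (text expression : String) :
    match_expression_alt text expression =
      String.ofList
        (match (((List.splitOn ',' (PySem.Chars.replace (PySem.Chars.replace expression.toList ['\r'] ['\n']) ['\n'] [','])).filter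
              (fun c => !(pAf c).isEmpty)).map (fun c => (pAf c).map PySem.Chars.lower)).find?
              (fun clause => clause.all (fun p => PySem.Chars.isIn p (PySem.Chars.lower text.toList))) with
          | some clause => PySem.Chars.join ['+'] clause
          | none => []) := by
  rw [match_expression_alt, scanB_eq_find?, clausesRaw_eq_dListB, dListB_empty_state,
      replaces_eq_map_sigma]

-- ===== VERDICT (by name: the statement is the Claim_ definition above) =====
theorem match_expression_spec : Claim_equal_match_expression := by
  intro text expression _
  unfold Spec_match_expression
  rw [alt_eq_find?]
  by_cases he : expression.toList.isEmpty
  · rw [match_expression, if_pos he]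
    have hel : expression.toList = [] := List.isEmpty_iff.mp he
    rw [hel]
    rfl
  · rw [match_expression, if_neg he]
    by_cases hK : ((List.splitOn ',' (PySem.Chars.replace (PySem.Chars.replace expression.toList ['\r'] ['\n']) ['\n'] [','])).filter (fun c => !(pAf c).isEmpty)) = []
    · rw [split_clausesA_nil expression.toList hK, hK]
      rfl
    · rw [split_clausesA_eq expression.toList hK]
      simp only [matchLoopA_eq_find?]
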